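-- pv_equiv track=rewrite | github.com/Janeliao123/MCAC-Job-Sceduling-Problem | run/functions.py | find_job_level
-- ===== SOURCE A (Python) =====
-- def find_job_level(job_schedule):  # 找出同一層的工作
--     pos_jobs = {}
--     max_pos = max([len(x) for x in job_schedule.values()])
--     position = range(0,max_pos)
--     for p in position:
--         pos_jobs[p] = []
--         for j in job_schedule:
--             if len(job_schedule[j]) > p:
--                  pos_jobs[p].append(job_schedule[j][p][0])
--     return pos_jobs, max_pos
-- ===== SOURCE B (Python) =====
-- def find_job_level(job_schedule):
--     # One pass over every job's list, appending each entry into its position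
--     # bucket directly, instead of rescanning all jobs once per position.
--     seqs = list(job_schedule.values())
--     max_pos = max((len(s) for s in seqs), default=0)
--     buckets = [[] for _ in range(max_pos)]
--     for s in seqs:
--         for p, entry in enumerate(s):
--             buckets[p].append(entry[0])
--     return {p: b for p, b in enumerate(buckets)}, max_pos
-- ===== Notes on version B (the rewrite author's own statement) =====
-- stated objective: alternative
-- what changed: Instead of rescanning every job once per position (outer loop over range(max_pos), inner loop over all jobs), B walks each job's list exactly once and appends each entry into its position bucket directly.
-- outside the precondition, e.g. on find_job_level({}): A raises ValueError, B returns ({}, 0)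
-- crash fix: On an empty dict A raises ValueError (max of an empty sequence) while B returns ({}, 0). — e.g. on find_job_level([]): A raises ValueError, B returns ([], 0)
import Mathlib
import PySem

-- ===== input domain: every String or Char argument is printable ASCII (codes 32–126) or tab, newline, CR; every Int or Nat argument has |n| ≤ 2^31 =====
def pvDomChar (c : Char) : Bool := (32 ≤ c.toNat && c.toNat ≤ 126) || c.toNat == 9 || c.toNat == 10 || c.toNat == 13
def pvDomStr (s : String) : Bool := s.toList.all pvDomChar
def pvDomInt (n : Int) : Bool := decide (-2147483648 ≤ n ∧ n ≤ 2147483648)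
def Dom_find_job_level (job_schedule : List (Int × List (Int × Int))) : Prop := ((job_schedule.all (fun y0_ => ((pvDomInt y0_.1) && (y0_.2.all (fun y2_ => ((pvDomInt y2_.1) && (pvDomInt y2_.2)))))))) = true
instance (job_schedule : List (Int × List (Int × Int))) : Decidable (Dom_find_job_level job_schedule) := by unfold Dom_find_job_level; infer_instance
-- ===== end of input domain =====

-- B replaces A's rescan of every job once per position by ONE pass over each job's
-- list, appending each entry into its position bucket directly (objective: alternative).

-- ===== PORT A =====
-- the dict job_schedule is its association list (unique keys under Pre_);
-- 'for j in job_schedule: … job_schedule[j] …' is the fold over the pairs, lookup = the pair's value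
def find_job_level (job_schedule : List (Int × List (Int × Int))) : (List (Int × List Int)) × Int :=
  let max_pos : Int :=
    (PySem.List.max? (job_schedule.map (fun x => (x.2.length : Int))) (fun v => v)).getD 0
  let pos_jobs : List (Int × List Int) :=
    (PySem.List.pyRange 0 max_pos 1).foldl
      (fun acc p =>
        acc ++ [(p,
          job_schedule.foldl (fun lst j =>
            if p < (j.2.length : Int) then lst ++ [(PySem.List.pyGetD j.2 p (0, 0)).1]
            else lst) [])]) []
  (pos_jobs, max_pos)

-- ===== PORT B =====
-- 'buckets[p].append(entry[0])': read the bucket, append, write it back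
def pvStep (bs : List (List Int)) (pe : Int × (Int × Int)) : List (List Int) :=
  PySem.List.pySetD bs pe.1 (PySem.List.pyGetD bs pe.1 [] ++ [pe.2.1])

-- 'for p, entry in enumerate(s): buckets[p].append(entry[0])'
def pvUpd (bs : List (List Int)) (s : List (Int × Int)) : List (List Int) :=
  (PySem.List.enumerate s 0).foldl pvStep bs

def find_job_level_alt (job_schedule : List (Int × List (Int × Int))) : (List (Int × List Int)) × Int :=
  let seqs := job_schedule.map Prod.snd
  let max_pos : Int :=
    (PySem.List.max? (seqs.map (fun s => (s.length : Int))) (fun v => v)).getD 0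
  let buckets := seqs.foldl pvUpd (List.replicate max_pos.toNat [])
  ((PySem.List.enumerate buckets 0).map (fun pb => (pb.1, pb.2)), max_pos)

-- ===== PRECONDITION & SPEC =====
-- Pre_ excludes the empty dict, on which A raises ValueError (max of an empty sequence),
-- and duplicate-key association lists, which do not arise from a Python dict argument.
def Pre_find_job_level (job_schedule : List (Int × List (Int × Int))) : Prop :=
  job_schedule ≠ [] ∧ (job_schedule.map Prod.fst).Nodup
instance (job_schedule : List (Int × List (Int × Int))) : Decidable (Pre_find_job_level job_schedule) := by unfold Pre_find_job_level; infer_instance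

def pvWitness_find_job_level : (List (Int × List (Int × Int))) := [(1, [(2, 3)]), (4, [])]

-- On the empty dict A raises ValueError (max of an empty sequence) while B returns ({}, 0).
def Raises_find_job_level (job_schedule : List (Int × List (Int × Int))) : Prop :=
  job_schedule = []
instance (job_schedule : List (Int × List (Int × Int))) : Decidable (Raises_find_job_level job_schedule) := by unfold Raises_find_job_level; infer_instance
def pvRaiseWitness_find_job_level : (List (Int × List (Int × Int))) := []
def pvRaiseWitnessOut_find_job_level : (List (Int × List Int)) × Int := ([], 0)

def Spec_find_job_level (job_schedule : List (Int × List (Int × Int))) (out : (List (Int × List Int)) × Int) : Prop := out = find_job_level_alt job_schedule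
instance (job_schedule : List (Int × List (Int × Int))) (out : (List (Int × List Int)) × Int) : Decidable (Spec_find_job_level job_schedule out) := by unfold Spec_find_job_level; infer_instance

-- ===== CLAIM (what is proved, stated in full; the proofs are below) =====
def Claim_equal_find_job_level : Prop := ∀ (job_schedule : List (Int × List (Int × Int))), Dom_find_job_level job_schedule → Pre_find_job_level job_schedule → Spec_find_job_level job_schedule (find_job_level job_schedule)

def Claim_raises_find_job_level : Prop := (∀ (job_schedule : List (Int × List (Int × Int))), Dom_find_job_level job_schedule → Raises_find_job_level job_schedule → ¬ Pre_find_job_level job_schedule) ∧ (Dom_find_job_level (pvRaiseWitness_find_job_level) ∧ Raises_find_job_level (pvRaiseWitness_find_job_level) ∧ find_job_level_alt (pvRaiseWitness_find_job_level) = pvRaiseWitnessOut_find_job_level)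

-- ===== LEMMAS AND PROOFS =====

-- bucket read, total form used throughout
def pvG (bs : List (List Int)) (k : Nat) : List Int := bs.getD k []

theorem pvStep_length (bs : List (List Int)) (pe : Int × (Int × Int)) :
    (pvStep bs pe).length = bs.length := by
  simp [pvStep, PySem.List.length_pySetD]

theorem pvUpd_length (bs : List (List Int)) (s : List (Int × Int)) :
    (pvUpd bs s).length = bs.length := by
  unfold pvUpd
  generalize (0 : Int) = a
  induction s generalizing a bs with
  | nil => simp [PySem.List.enumerate_nil]
  | cons x t ih => simp [PySem.List.enumerate_cons, ih, pvStep_length]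

theorem pvFold_upd_length (L : List (List (Int × Int))) (bs : List (List Int)) :
    (L.foldl pvUpd bs).length = bs.length := by
  induction L generalizing bs with
  | nil => rfl
  | cons s L ih => simp [List.foldl_cons, ih, pvUpd_length]

-- one job's pass: bucket k gains s[k].1 exactly when a ≤ k < a + len s
theorem pvG_set_self (bs : List (List Int)) (v : List Int) (a : Nat) (ha : a < bs.length) :
    pvG (bs.set a v) a = v := by
  simp [pvG, List.getD, ha]

theorem pvG_set_ne (bs : List (List Int)) (v : List Int) (a k : Nat) (h : k ≠ a) :
    pvG (bs.set a v) k = pvG bs k := by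
  simp [pvG, List.getD, List.getElem?_set_ne (fun e => h e.symm)]

theorem pvUpd_get (s : List (Int × Int)) (a : Nat) (bs : List (List Int))
    (h : a + s.length ≤ bs.length) (k : Nat) (hk : k < bs.length) :
    pvG ((PySem.List.enumerate s (a : Int)).foldl pvStep bs) k =
      if hw : a ≤ k ∧ k < a + s.length then pvG bs k ++ [(s[k - a]'(by omega)).1]
      else pvG bs k := by
  induction s generalizing a bs with
  | nil =>
    simp only [PySem.List.enumerate_nil, List.foldl_nil]
    rw [dif_neg (by simp only [List.length_nil]; omega)]
  | cons x t ih =>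
    simp only [PySem.List.enumerate_cons, List.foldl_cons]
    have hstep : pvStep bs ((a : Int), x) = bs.set a (pvG bs a ++ [x.1]) := by
      simp [pvStep, pvG, PySem.List.pySetD_natCast, PySem.List.pyGetD_natCast]
    have hcast : (a : Int) + 1 = ((a + 1 : Nat) : Int) := by push_cast; ring
    rw [hstep, hcast]
    have hlen : a + 1 + t.length ≤ (bs.set a (pvG bs a ++ [x.1])).length := by
      simp only [List.length_set]; simp at h; omega
    have hk' : k < (bs.set a (pvG bs a ++ [x.1])).length := by
      simp only [List.length_set]; exact hk
    rw [ih (a + 1) _ hlen hk']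
    by_cases hka : k = a
    · subst hka
      rw [dif_neg (by omega), dif_pos (by refine ⟨le_rfl, ?_⟩; simp only [List.length_cons]; simp at h; omega)]
      rw [pvG_set_self bs _ k (by simp at h; omega)]
      simp
    · rw [pvG_set_ne bs _ a k hka]
      by_cases hw : a + 1 ≤ k ∧ k < a + 1 + t.length
      · rw [dif_pos hw, dif_pos (by refine ⟨by omega, ?_⟩; simp only [List.length_cons]; omega)]
        simp only [show k - a = (k - (a + 1)) + 1 from by omega, List.getElem_cons_succ]
      · rw [dif_neg hw, dif_neg (by simp only [List.length_cons]; omega)]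

-- the whole pass: bucket k collects entry k of every job long enough, in job order
theorem pvFold_upd_get (L : List (List (Int × Int))) (bs : List (List Int))
    (hL : ∀ s ∈ L, s.length ≤ bs.length) (k : Nat) (hk : k < bs.length) :
    pvG (L.foldl pvUpd bs) k =
      pvG bs k ++ (L.filter (fun s => decide ((k : Int) < (s.length : Int)))).map
        (fun s => (PySem.List.pyGetD s (k : Int) (0, 0)).1) := by
  induction L generalizing bs with
  | nil => simp
  | cons s L ih =>
    simp only [List.foldl_cons, List.filter_cons]
    have hk' : k < (pvUpd bs s).length := by rw [pvUpd_length]; exact hk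
    have hL' : ∀ u ∈ L, u.length ≤ (pvUpd bs s).length := by
      intro u hu; rw [pvUpd_length]; exact hL u (List.mem_cons_of_mem _ hu)
    rw [ih (pvUpd bs s) hL' hk']
    have hg := pvUpd_get s 0 bs (by simpa using hL s List.mem_cons_self) k hk
    simp only [Nat.cast_zero, Nat.sub_zero, zero_add] at hg
    have hup : pvG (pvUpd bs s) k = _ := hg
    rw [hup]
    by_cases hks : k < s.length
    · rw [dif_pos ⟨Nat.zero_le k, hks⟩, if_pos (by simpa using (by exact_mod_cast hks : (k : Int) < (s.length : Int)))]
      simp [List.append_assoc, PySem.List.pyGetD_natCast, hks]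
    · rw [dif_neg (by omega), if_neg (by simpa using (by exact_mod_cast hks : ¬ (k : Int) < (s.length : Int)))]


-- 'lst.append(f(s)) if cond' loop = filter-then-map, with any initial accumulator
theorem pvFoldIf (L : List (List (Int × Int))) (k : Nat) (acc : List Int) :
    L.foldl (fun lst s => if (k : Int) < (s.length : Int) then lst ++ [(PySem.List.pyGetD s (k : Int) (0, 0)).1] else lst) acc
      = acc ++ (L.filter (fun s => decide ((k : Int) < (s.length : Int)))).map
          (fun s => (PySem.List.pyGetD s (k : Int) (0, 0)).1) := by
  induction L generalizing acc with
  | nil => simp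
  | cons s L ih =>
    simp only [List.foldl_cons, List.filter_cons]
    by_cases h : (k : Int) < (s.length : Int)
    · rw [if_pos h, ih]; simp [h]
    · rw [if_neg h, ih]; simp [h]

theorem pvG_replicate (n : Nat) (k : Nat) : pvG (List.replicate n ([] : List Int)) k = [] := by
  simp [pvG, List.getD, List.getElem?_replicate]
  split <;> rfl

theorem pvMainEq (js : List (Int × List (Int × Int))) (hne : js ≠ []) :
    find_job_level js = find_job_level_alt js := by
  have hmm : ((js.map Prod.snd).map (fun s => (s.length : Int))) = js.map (fun x => (x.2.length : Int)) := by
    rw [List.map_map]; rfl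
  simp only [find_job_level, find_job_level_alt, hmm]
  refine Prod.ext ?_ rfl
  -- name the shared maximum
  set M : Int := (PySem.List.max? (js.map (fun x => (x.2.length : Int))) (fun v => v)).getD 0 with hMdef
  have hlensne : js.map (fun x => (x.2.length : Int)) ≠ [] := by
    simpa using hne
  obtain ⟨m, hmax⟩ : ∃ m, PySem.List.max? (js.map (fun x => (x.2.length : Int))) (fun v => v) = some m := by
    cases h : PySem.List.max? (js.map (fun x => (x.2.length : Int))) (fun v => v) with
    | none =>
      rw [PySem.List.max?_eq_none_iff] at h
      exact absurd h hlensne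
    | some m => exact ⟨m, rfl⟩
  have hMm : M = m := by rw [hMdef, hmax]; rfl
  have hM0 : 0 ≤ M := by
    have := PySem.List.max?_mem hmax
    rw [List.mem_map] at this
    obtain ⟨x, -, hx⟩ := this
    rw [hMm, ← hx]; positivity
  have hMall : ∀ s ∈ js.map Prod.snd, s.length ≤ M.toNat := by
    intro s hs
    rw [List.mem_map] at hs
    obtain ⟨x, hxmem, hx⟩ := hs
    have := PySem.List.max?_isMax hmax ((x.2.length : Int)) (List.mem_map_of_mem hxmem)
    simp only at this
    rw [hMm] at hM0 ⊢
    rw [← hx]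
    omega
  -- name the buckets
  set base : List (List Int) := List.replicate M.toNat [] with hbase
  set seqs : List (List (Int × Int)) := js.map Prod.snd with hseqs
  have hblen : (seqs.foldl pvUpd base).length = M.toNat := by
    rw [pvFold_upd_length, hbase, List.length_replicate]
  simp only []
  rw [PySem.List.foldl_append_singleton_eq_map, List.nil_append]
  rw [PySem.List.enumerate_eq_map_pyRange (d := ([] : List Int)), List.map_map]
  have hlen2 : PySem.List.len (seqs.foldl pvUpd base) = M := by
    have : PySem.List.len (seqs.foldl pvUpd base) = ((seqs.foldl pvUpd base).length : Int) := by
      simp [PySem.List.len]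
    rw [this, hblen, Int.toNat_of_nonneg hM0]
  rw [hlen2]
  refine List.map_congr_left ?_
  intro p hp
  rw [PySem.List.mem_pyRange_one] at hp
  obtain ⟨k, rfl⟩ : ∃ k : Nat, p = (k : Int) := ⟨p.toNat, (Int.toNat_of_nonneg hp.1).symm⟩
  have hkM : k < M.toNat := by omega
  have hfold : List.foldl (fun lst (j : Int × List (Int × Int)) => if (k : Int) < (j.2.length : Int) then lst ++ [(PySem.List.pyGetD j.2 (k : Int) (0, 0)).1] else lst) [] js
      = List.foldl (fun lst (s : List (Int × Int)) => if (k : Int) < (s.length : Int) then lst ++ [(PySem.List.pyGetD s (k : Int) (0, 0)).1] else lst) [] seqs := by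
    rw [hseqs, List.foldl_map]
  have hget : PySem.List.pyGetD (seqs.foldl pvUpd base) (k : Int) [] = pvG (seqs.foldl pvUpd base) k := by
    rw [PySem.List.pyGetD_natCast]; rfl
  have hbuck := pvFold_upd_get seqs base
      (by intro s hs; rw [hbase, List.length_replicate]; exact hMall s hs)
      k (by rw [hbase, List.length_replicate]; exact hkM)
  rw [pvG_replicate, List.nil_append] at hbuck
  have hfilt := pvFoldIf seqs k []
  rw [List.nil_append] at hfilt
  simp only [Function.comp]
  refine Prod.ext rfl ?_
  simp only []
  rw [hfold, hfilt, hget, hbuck]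

-- ===== VERDICT (by name: the statement is the Claim_ definition above) =====
theorem find_job_level_spec : Claim_equal_find_job_level := by
  intro js _ hpre
  unfold Spec_find_job_level
  exact pvMainEq js hpre.1

@[simp] theorem find_job_level_raises : Claim_raises_find_job_level := by
  unfold Claim_raises_find_job_level
  exact ⟨fun js _ hr hp => hp.1 hr, by decide⟩
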